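-- pv_equiv track=rewrite | github.com/DarkAlexWang/leetcode | Microsoft/OnlineAssessment/even_sum_in_array.py | even_sum_in_array
-- ===== SOURCE A (Python) =====
-- def even_sum_in_array(arr):
--     count = 0
--     #arr_set = set()
--     #for i in range(1, len(arr)):
--     #    sum_ = arr[i -1] + arr[i]
--     #    if sum_ % 2 == 0 and (arr[i - 1], arr[i]) not in arr_set and (arr[i], arr[i - 1]) not in arr_set:
--     #        arr_set.add((arr[i - 1], arr[i]))
--     #        count += 1
--     #    elif i == len(arr) - 1 and (arr[0] + arr[i]) % 2 == 0:
--     #        count += 1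
--     #    else:
--     #        continue
--     #return count
--     i = 1
--     while i < len(arr):
--         sum_ = arr[i] + arr[i - 1]
--         if sum_ % 2 == 0:
--             count += 1
--             i += 2
--         else:
--             i += 1
--     if (arr[0] + arr[-1]) % 2 == 0 and (arr[0] + arr[1]) % 2 != 0:
--         count += 1
--     return count
-- ===== SOURCE B (Python) =====
-- def even_sum_in_array(arr):
--     # Run-length scan: each maximal run of equal-parity elements of
--     # length L contributes L//2 pairs; same trailing wrap adjustment.
--     count = 0
--     streak = 1
--     prev = arr[0]
--     for x in arr[1:]:
--         if (x - prev) % 2 == 0: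
--             streak += 1
--         else:
--             count += streak // 2
--             streak = 1
--         prev = x
--     count += streak // 2
--     if (arr[0] + arr[-1]) % 2 == 0 and (arr[0] + arr[1]) % 2 != 0:
--         count += 1
--     return count
-- ===== Notes on version B (the rewrite author's own statement) =====
-- stated objective: alternative
-- what changed: Replaces A's greedy index-jump while-loop (skip 2 on a matched pair) by a single run-length scan that adds streak//2 at every parity change, relying on the fact that greedy matching on a path yields floor(run/2) per maximal equal-parity run; the trailing wrap adjustment is unchanged.
import Mathlib
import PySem

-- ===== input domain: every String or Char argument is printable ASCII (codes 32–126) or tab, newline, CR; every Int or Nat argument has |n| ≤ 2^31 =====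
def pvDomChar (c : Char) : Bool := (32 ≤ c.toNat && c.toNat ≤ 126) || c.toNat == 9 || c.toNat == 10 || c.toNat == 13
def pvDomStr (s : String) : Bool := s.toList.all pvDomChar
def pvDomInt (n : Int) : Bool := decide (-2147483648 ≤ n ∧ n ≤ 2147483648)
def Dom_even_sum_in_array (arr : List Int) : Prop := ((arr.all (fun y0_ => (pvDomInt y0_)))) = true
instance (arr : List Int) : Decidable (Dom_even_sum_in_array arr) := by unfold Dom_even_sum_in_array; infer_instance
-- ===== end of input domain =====

-- B replaces A's greedy index-jump while-loop by a run-length scan (streak//2 per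
-- maximal equal-parity run) with the same trailing wrap adjustment: an alternative
-- decomposition of the same O(n) count.


-- ===== PORT A =====
-- the while loop: i walks forward, +2 after a counted even-sum pair, +1 otherwise
-- (indices hit by the loop satisfy 1 ≤ i < len, so pyGetD is exact there)
def pvALoop (arr : List Int) (count : Int) (i : Nat) : Int :=
  if _h : i < arr.length then
    let sum_ := PySem.List.pyGetD arr (i : Int) 0 + PySem.List.pyGetD arr ((i : Int) - 1) 0
    if PySem.Int.mod sum_ 2 = 0 then pvALoop arr (count + 1) (i + 2)
    else pvALoop arr count (i + 1)
  else count
termination_by arr.length - i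

def even_sum_in_array (arr : List Int) : Int :=
  let count := pvALoop arr 0 1
  if PySem.Int.mod (PySem.List.pyGetD arr 0 0 + PySem.List.pyGetD arr (-1) 0) 2 = 0 ∧
     ¬ PySem.Int.mod (PySem.List.pyGetD arr 0 0 + PySem.List.pyGetD arr 1 0) 2 = 0
  then count + 1 else count

-- ===== PORT B =====
-- run-length scan: streak of equal-parity elements; add streak // 2 at each break and at the end
def pvBLoop (count streak prev : Int) : List Int → Int
  | [] => count + PySem.Int.floordiv streak 2
  | x :: r =>
    if PySem.Int.mod (x - prev) 2 = 0 then pvBLoop count (streak + 1) x r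
    else pvBLoop (count + PySem.Int.floordiv streak 2) 1 x r

def even_sum_in_array_alt (arr : List Int) : Int :=
  let prev := PySem.List.pyGetD arr 0 0
  let count := pvBLoop 0 1 prev (PySem.List.slice arr (some 1) none)
  if PySem.Int.mod (PySem.List.pyGetD arr 0 0 + PySem.List.pyGetD arr (-1) 0) 2 = 0 ∧
     ¬ PySem.Int.mod (PySem.List.pyGetD arr 0 0 + PySem.List.pyGetD arr 1 0) 2 = 0
  then count + 1 else count

-- ===== PRECONDITION & SPEC =====
-- Python A raises IndexError on lists of length < 2 (arr[0] / arr[1]); excluded.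
def Pre_even_sum_in_array (arr : List Int) : Prop := 2 ≤ arr.length
instance (arr : List Int) : Decidable (Pre_even_sum_in_array arr) := by unfold Pre_even_sum_in_array; infer_instance
def pvWitness_even_sum_in_array : List Int := [1, 2, 4]

def Spec_even_sum_in_array (arr : List Int) (out : Int) : Prop := out = even_sum_in_array_alt arr
instance (arr : List Int) (out : Int) : Decidable (Spec_even_sum_in_array arr out) := by unfold Spec_even_sum_in_array; infer_instance

-- ===== CLAIM (what is proved, stated in full; the proofs are below) =====
def Claim_equal_even_sum_in_array : Prop := ∀ (arr : List Int), Dom_even_sum_in_array arr → Pre_even_sum_in_array arr → Spec_even_sum_in_array arr (even_sum_in_array arr)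

-- ===== LEMMAS AND PROOFS =====

-- common abstraction: greedy pairing state machine over the suffix
-- (some p = previous element p still unpaired; none = fresh)
def pvG : Option Int → List Int → Int
  | _, [] => 0
  | none, x :: r => pvG (some x) r
  | some p, x :: r => if (x + p) % 2 = 0 then 1 + pvG none r else pvG (some x) r

lemma pvG_none_drop (arr : List Int) (j : Nat) (hj : j < arr.length) :
    pvG none (arr.drop j) = pvG (some arr[j]) (arr.drop (j + 1)) := by
  rw [List.drop_eq_getElem_cons hj, pvG]

lemma pvALoop_eq (arr : List Int) :
    ∀ (k i : Nat), arr.length ≤ i + k → 1 ≤ i → ∀ c,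
      pvALoop arr c i = c + pvG (some (arr.getD (i - 1) 0)) (arr.drop i) := by
  intro k
  induction k with
  | zero =>
    intro i hk _ c
    rw [pvALoop, dif_neg (by omega), List.drop_of_length_le (by omega), pvG]
    omega
  | succ k ih =>
    intro i hk hi c
    by_cases h : i < arr.length
    · rw [pvALoop, dif_pos h]
      have hcast : ((i : Int) - 1) = (((i - 1 : Nat) : Int)) := by omega
      simp only [hcast, PySem.List.pyGetD_natCast]
      have hget : arr.getD i 0 = arr[i] := List.getD_eq_getElem arr 0 h
      have hmod : ∀ s : Int, PySem.Int.mod s 2 = s % 2 := fun s =>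
        PySem.Int.mod_eq_emod_of_pos (by norm_num)
      rw [hmod]
      have hdrop : arr.drop i = arr[i] :: arr.drop (i + 1) := List.drop_eq_getElem_cons h
      by_cases h2 : (arr.getD i 0 + arr.getD (i - 1) 0) % 2 = 0
      · rw [if_pos h2, ih (i + 2) (by omega) (by omega)]
        rw [hdrop, pvG, if_pos (by rw [← hget]; omega)]
        by_cases h3 : i + 1 < arr.length
        · rw [pvG_none_drop arr (i + 1) h3]
          have e2 : i + 1 + 1 = i + 2 := by omega
          have e3 : arr.getD (i + 2 - 1) 0 = arr[i + 1] := by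
            simpa using List.getD_eq_getElem arr 0 h3
          rw [e2, e3]
          omega
        · rw [List.drop_of_length_le (show arr.length ≤ i + 1 by omega),
              List.drop_of_length_le (show arr.length ≤ i + 2 by omega), pvG, pvG]
          omega
      · rw [if_neg h2, ih (i + 1) (by omega) (by omega)]
        rw [hdrop, pvG, if_neg (by rw [← hget]; omega)]
        have e3 : arr.getD (i + 1 - 1) 0 = arr[i] := by simpa using hget
        rw [e3]
    · rw [pvALoop, dif_neg h, List.drop_of_length_le (by omega), pvG]
      omega

lemma pvBLoop_eq :
    ∀ (l : List Int) (c s p : Int), 1 ≤ s →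
      pvBLoop c s p l =
        c + s / 2 + (if s % 2 = 1 then pvG (some p) l else pvG none l) := by
  intro l
  induction l with
  | nil =>
    intro c s p hs
    rw [pvBLoop, PySem.Int.floordiv_eq_ediv_of_pos (by norm_num)]
    split <;> rw [pvG] <;> omega
  | cons x r ih =>
    intro c s p hs
    have hmod : ∀ t : Int, PySem.Int.mod t 2 = t % 2 := fun t =>
      PySem.Int.mod_eq_emod_of_pos (by norm_num)
    have hfd : ∀ t : Int, PySem.Int.floordiv t 2 = t / 2 := fun t =>
      PySem.Int.floordiv_eq_ediv_of_pos (by norm_num)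
    rw [pvBLoop]
    simp only [hmod, hfd]
    by_cases h : (x - p) % 2 = 0
    · rw [if_pos h, ih c (s + 1) x (by omega)]
      by_cases hso : s % 2 = 1
      · rw [if_neg (show ¬ (s + 1) % 2 = 1 by omega), if_pos hso,
            pvG, if_pos (show (x + p) % 2 = 0 by omega)]
        omega
      · rw [if_pos (show (s + 1) % 2 = 1 by omega), if_neg hso, pvG]
        omega
    · rw [if_neg h, ih (c + s / 2) 1 x (by norm_num)]
      rw [if_pos (show (1 : Int) % 2 = 1 by norm_num)]
      by_cases hso : s % 2 = 1
      · rw [if_pos hso, pvG, if_neg (show ¬ (x + p) % 2 = 0 by omega)]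
        omega
      · rw [if_neg hso, pvG]
        omega

lemma pvCore_eq (a b : Int) (t : List Int) :
    pvALoop (a :: b :: t) 0 1 =
      pvBLoop 0 1 (PySem.List.pyGetD (a :: b :: t) 0 0)
        (PySem.List.slice (a :: b :: t) (some 1) none) := by
  have hA := pvALoop_eq (a :: b :: t) (a :: b :: t).length 1 (by omega) (by omega) 0
  have hslice : PySem.List.slice (a :: b :: t) (some 1) none = b :: t := by
    simpa using PySem.List.slice_from_natCast (a :: b :: t) 1
  have hB := pvBLoop_eq (b :: t) 0 1 a (by norm_num)
  rw [hA, hslice, PySem.List.pyGetD_zero_cons, hB]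
  norm_num

-- ===== VERDICT (by name: the statement is the Claim_ definition above) =====
theorem even_sum_in_array_spec : Claim_equal_even_sum_in_array := by
  intro arr _ hpre
  unfold Spec_even_sum_in_array even_sum_in_array even_sum_in_array_alt
  match arr, hpre with
  | a :: b :: t, _ => rw [pvCore_eq a b t]
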